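-- pv_equiv track=rewrite | github.com/yanzixi020130/aircraft_kb | src/llm_fill_missing_formulas.py | _wrap_latex_subscripts
-- ===== SOURCE A (Python) =====
-- from typing import Dict, List, Any
--
-- _LATEX_SUBSCRIPT_BREAKS = set(" +-*=(),;:^")
--
-- def _wrap_latex_subscripts(s: str) -> str:
--     """Ensure subscripts are wrapped with braces, e.g. x_1/4 -> x_{1/4}."""
--     out: List[str] = []
--     i = 0
--     while i < len(s):
--         ch = s[i]
--         if ch == "_" and i + 1 < len(s):
--             if s[i + 1] == "{":
--                 out.append(ch)
--                 i += 1
--                 continue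
--             j = i + 1
--             token: List[str] = []
--             while j < len(s) and s[j] not in _LATEX_SUBSCRIPT_BREAKS:
--                 token.append(s[j])
--                 j += 1
--             if token:
--                 out.append("_{")
--                 out.append("".join(token))
--                 out.append("}")
--                 i = j
--                 continue
--         out.append(ch)
--         i += 1
--     return "".join(out)
-- ===== SOURCE B (Python) =====
-- _LATEX_SUBSCRIPT_BREAKS = " +-*=(),;:^"
--
--
-- def _wrap_latex_subscripts(s: str) -> str:
--     """Split into break-delimited runs; inside each run, the first underscore
--     that is followed by a char other than '{' wraps the whole run tail."""
--
--     def _fix(run: str) -> str: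
--         for k in range(len(run) - 1):
--             if run[k] == "_" and run[k + 1] != "{":
--                 return run[: k + 1] + "{" + run[k + 1:] + "}"
--         return run
--
--     pieces = []
--     start = 0
--     for idx, ch in enumerate(s):
--         if ch in _LATEX_SUBSCRIPT_BREAKS:
--             pieces.append(_fix(s[start:idx]))
--             pieces.append(ch)
--             start = idx + 1
--     pieces.append(_fix(s[start:]))
--     return "".join(pieces)
-- ===== Notes on version B (the rewrite author's own statement) =====
-- stated objective: alternative
-- what changed: Replaces A's index-based streaming scanner (with an inner char-by-char token-collecting loop) by splitting the string into runs delimited by break characters and applying a closed-form per-run transformation: the first underscore not followed by an opening brace wraps the whole run tail in braces.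
import Mathlib
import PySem

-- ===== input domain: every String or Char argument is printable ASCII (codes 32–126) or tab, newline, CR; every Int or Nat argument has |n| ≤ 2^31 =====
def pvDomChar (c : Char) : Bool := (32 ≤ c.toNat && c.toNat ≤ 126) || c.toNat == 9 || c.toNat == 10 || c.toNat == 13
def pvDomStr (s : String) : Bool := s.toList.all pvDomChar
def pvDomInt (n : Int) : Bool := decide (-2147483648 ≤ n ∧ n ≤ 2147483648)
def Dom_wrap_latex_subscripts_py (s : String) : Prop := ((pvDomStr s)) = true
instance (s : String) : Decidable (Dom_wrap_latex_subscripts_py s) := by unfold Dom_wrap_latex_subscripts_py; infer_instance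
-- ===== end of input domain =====

-- B replaces A's streaming index scanner (with its inner token loop) by a split into
-- break-delimited runs plus a closed-form per-run wrap; objective: alternative structure.

-- ===== PORT A =====
-- the break set " +-*=(),;:^" of the Python module
def pvBreaks : List Char := [' ', '+', '-', '*', '=', '(', ')', ',', ';', ':', '^']

-- a char NOT in the break set (the inner while-loop's continuation condition)
def pvNonBreak (c : Char) : Bool := !(pvBreaks.contains c)

-- A's while loop over the remaining suffix: s[i]=head, s[i+1]=head of tail;
-- the inner token loop is takeWhile/dropWhile of the non-break condition.
def pvGoA : List Char → List Char
  | [] => []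
  | c :: rest =>
    if c = '_' ∧ rest ≠ [] then
      if rest.head? = some '{' then
        c :: pvGoA rest
      else
        let token := rest.takeWhile pvNonBreak
        if token = [] then
          c :: pvGoA rest
        else
          c :: '{' :: (token ++ '}' :: pvGoA (rest.dropWhile pvNonBreak))
    else
      c :: pvGoA rest
  termination_by l => l.length
  decreasing_by
  · simp
  · simp
  · simpa using Nat.lt_succ_of_le (List.length_dropWhile_le pvNonBreak rest)
  · simp

def wrap_latex_subscripts_py (s : String) : String := String.ofList (pvGoA s.toList)

-- ===== PORT B =====
-- Source B's _fix: first index k with run[k] = '_' and run[k+1] ≠ '{' wraps the tail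
def pvFix : List Char → List Char
  | [] => []
  | [c] => [c]
  | c :: d :: rest =>
    if c = '_' ∧ d ≠ '{' then
      '_' :: '{' :: d :: (rest ++ ['}'])
    else
      c :: pvFix (d :: rest)

-- Source B's main loop: cut the string at break characters (kept as their own pieces),
-- apply pvFix to every run between them
def pvGoB (l : List Char) : List Char :=
  match h : l.dropWhile pvNonBreak with
  | [] => pvFix l
  | b :: r => pvFix (l.takeWhile pvNonBreak) ++ b :: pvGoB r
  termination_by l.length
  decreasing_by
    have := List.length_dropWhile_le pvNonBreak l
    rw [h] at this
    simp at this
    omega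

def wrap_latex_subscripts_py_alt (s : String) : String := String.ofList (pvGoB s.toList)

-- ===== PRECONDITION & SPEC =====
def Spec_wrap_latex_subscripts_py (s : String) (out : String) : Prop := out = wrap_latex_subscripts_py_alt s
instance (s : String) (out : String) : Decidable (Spec_wrap_latex_subscripts_py s out) := by unfold Spec_wrap_latex_subscripts_py; infer_instance

-- ===== CLAIM (what is proved, stated in full; the proofs are below) =====
def Claim_equal_wrap_latex_subscripts_py : Prop := ∀ (s : String), Dom_wrap_latex_subscripts_py s → Spec_wrap_latex_subscripts_py s (wrap_latex_subscripts_py s)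

-- ===== LEMMAS AND PROOFS =====

-- break characters are never '_'
theorem pvBreak_ne_underscore (c : Char) (h : pvNonBreak c = false) : c ≠ '_' := by
  have hm : c ∈ pvBreaks := by simpa [pvNonBreak] using h
  intro he; subst he; revert hm; decide

theorem pvDropWhile_head_false {p : Char → Bool} : ∀ (l : List Char) (b : Char) (r : List Char),
    l.dropWhile p = b :: r → p b = false := by
  intro l
  induction l with
  | nil => intro b r h; simp [List.dropWhile] at h
  | cons c t ih =>
    intro b r h
    by_cases hc : p c
    · rw [List.dropWhile_cons_of_pos hc] at h
      exact ih b r h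
    · rw [List.dropWhile_cons_of_neg hc] at h
      obtain ⟨h1, _⟩ := List.cons.inj h
      simp [← h1]
      simpa using hc

-- unfolding lemmas for the A-side scanner
theorem pvGoA_nil : pvGoA [] = [] := by rw [pvGoA]

theorem pvGoA_not_us (c : Char) (t : List Char) (hcu : c ≠ '_') :
    pvGoA (c :: t) = c :: pvGoA t := by
  rw [pvGoA]; simp [hcu]

theorem pvGoA_us_nil : pvGoA ['_'] = ['_'] := by rw [pvGoA]; simp [pvGoA_nil]

theorem pvGoA_us_brace (t : List Char) : pvGoA ('_' :: '{' :: t) = '_' :: pvGoA ('{' :: t) := by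
  rw [pvGoA]; simp

theorem pvGoA_us_break (d : Char) (t : List Char) (hd : pvNonBreak d = false) :
    pvGoA ('_' :: d :: t) = '_' :: pvGoA (d :: t) := by
  rw [pvGoA]
  simp
  intro _ h4
  simp [hd] at h4

theorem pvGoA_us_tok (d : Char) (t : List Char) (hd : pvNonBreak d = true) (hd2 : d ≠ '{') :
    pvGoA ('_' :: d :: t) =
      '_' :: '{' :: ((d :: t.takeWhile pvNonBreak) ++ '}' :: pvGoA (t.dropWhile pvNonBreak)) := by
  rw [pvGoA]
  simp [List.takeWhile_cons_of_pos hd, List.dropWhile_cons_of_pos hd]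
  exact fun h => absurd h hd2

-- unfolding lemmas for the B-side splitter
theorem pvGoB_unfold (l : List Char) :
    pvGoB l = pvFix (l.takeWhile pvNonBreak) ++
      (match l.dropWhile pvNonBreak with
       | [] => []
       | b :: r => b :: pvGoB r) := by
  rw [pvGoB]
  cases h : l.dropWhile pvNonBreak with
  | nil =>
    have ht : l.takeWhile pvNonBreak = l := by
      have := List.takeWhile_append_dropWhile (p := pvNonBreak) (l := l)
      rw [h] at this; simpa using this
    simp [ht]
  | cons b r => simp

theorem pvGoB_break (b : Char) (r : List Char) (hb : pvNonBreak b = false) :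
    pvGoB (b :: r) = b :: pvGoB r := by
  rw [pvGoB_unfold, List.takeWhile_cons_of_neg (by simp [hb]),
    List.dropWhile_cons_of_neg (by simp [hb])]
  simp [pvFix]

-- unfolding lemmas for Source B's per-run fix
theorem pvFix_cons_ne (c : Char) (hc : c ≠ '_') : ∀ X : List Char, pvFix (c :: X) = c :: pvFix X := by
  intro X
  cases X with
  | nil => simp [pvFix]
  | cons d r => simp [pvFix, hc]

theorem pvFix_us_brace (X : List Char) : pvFix ('_' :: '{' :: X) = '_' :: pvFix ('{' :: X) := by
  simp [pvFix]

theorem pvFix_wrap (d : Char) (X : List Char) (hd : d ≠ '{') :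
    pvFix ('_' :: d :: X) = '_' :: '{' :: d :: (X ++ ['}']) := by
  simp [pvFix, hd]

-- the two ports agree on every list of characters
theorem pvGoA_eq_pvGoB : ∀ (l : List Char), pvGoA l = pvGoB l := by
  have main : ∀ (n : Nat) (l : List Char), l.length ≤ n → pvGoA l = pvGoB l := by
    intro n
    induction n with
    | zero =>
      intro l hl
      have : l = [] := List.eq_nil_of_length_eq_zero (Nat.le_zero.mp hl)
      subst this
      rw [pvGoA_nil, pvGoB_unfold]
      simp [pvFix]
    | succ n ih =>
      intro l hl
      cases l with
      | nil => rw [pvGoA_nil, pvGoB_unfold]; simp [pvFix]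
      | cons c t =>
        have ht : t.length ≤ n := by simpa using hl
        by_cases hc : pvNonBreak c
        · by_cases hcu : c = '_'
          · subst hcu
            cases t with
            | nil =>
              rw [pvGoA_us_nil, pvGoB_unfold]
              simp [pvFix, List.takeWhile, List.dropWhile,
                (by decide : pvNonBreak '_' = true)]
            | cons d t' =>
              have ht' : t'.length ≤ n := by simp at ht; omega
              have h1 : pvNonBreak '_' = true := by decide
              by_cases hd : d = '{'
              · subst hd
                have h2 : pvNonBreak '{' = true := by decide
                rw [pvGoA_us_brace, ih ('{' :: t') ht, pvGoB_unfold ('{' :: t'),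
                  pvGoB_unfold ('_' :: '{' :: t')]
                simp only [List.takeWhile_cons_of_pos h1, List.takeWhile_cons_of_pos h2,
                  List.dropWhile_cons_of_pos h1, List.dropWhile_cons_of_pos h2,
                  pvFix_us_brace, List.cons_append]
              · by_cases hdb : pvNonBreak d
                · -- nonempty token: the wrap fires in both programs
                  rw [pvGoA_us_tok d t' hdb hd, pvGoB_unfold ('_' :: d :: t'),
                    List.takeWhile_cons_of_pos h1, List.takeWhile_cons_of_pos hdb,
                    List.dropWhile_cons_of_pos h1, List.dropWhile_cons_of_pos hdb,
                    pvFix_wrap d _ hd]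
                  simp only [List.cons_append, List.cons.injEq, true_and, List.append_assoc,
                    List.append_cancel_left_eq]
                  cases hD : t'.dropWhile pvNonBreak with
                  | nil => rw [pvGoA_nil]; simp
                  | cons b r =>
                    have hb : pvNonBreak b = false := pvDropWhile_head_false t' b r hD
                    have hr : r.length ≤ n := by
                      have h3 := List.length_dropWhile_le pvNonBreak t'
                      rw [hD] at h3
                      simp only [List.length_cons] at h3 ht ⊢
                      omega
                    rw [pvGoA_not_us b r (pvBreak_ne_underscore b hb), ih r hr]; simp
                · -- empty token: both leave the underscore alone
                  have hdb' : pvNonBreak d = false := by simpa using hdb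
                  rw [pvGoA_us_break d t' hdb',
                    pvGoA_not_us d t' (pvBreak_ne_underscore d hdb'), ih t' ht',
                    pvGoB_unfold ('_' :: d :: t'),
                    List.takeWhile_cons_of_pos h1, List.takeWhile_cons_of_neg (by simp [hdb']),
                    List.dropWhile_cons_of_pos h1, List.dropWhile_cons_of_neg (by simp [hdb'])]
                  simp [pvFix]
          · -- non-break, not an underscore: emitted as-is by both
            rw [pvGoA_not_us c t hcu, ih t ht, pvGoB_unfold (c :: t), pvGoB_unfold t,
              List.takeWhile_cons_of_pos hc, List.dropWhile_cons_of_pos hc,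
              pvFix_cons_ne c hcu]
            simp
        · -- break character: emitted as-is by both
          have hc' : pvNonBreak c = false := by simpa using hc
          rw [pvGoA_not_us c t (pvBreak_ne_underscore c hc'), pvGoB_break c t hc', ih t ht]
  intro l
  exact main l.length l le_rfl

-- ===== VERDICT (by name: the statement is the Claim_ definition above) =====
theorem wrap_latex_subscripts_py_spec : Claim_equal_wrap_latex_subscripts_py := by
  intro s _
  unfold Spec_wrap_latex_subscripts_py wrap_latex_subscripts_py wrap_latex_subscripts_py_alt
  rw [pvGoA_eq_pvGoB]
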